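-- pv_equiv track=rewrite | github.com/LogunLACC/PCSuite | pcsuite/src/pcsuite/security/firewall.py | _parse_allprofiles
-- ===== SOURCE A (Python) =====
-- from typing import Dict, Any
--
-- def _parse_allprofiles(output: str) -> Dict[str, str]:
--     states: Dict[str, str] = {"Domain": "unknown", "Private": "unknown", "Public": "unknown"}
--     current = None
--     for raw in (output or "").splitlines():
--         line = raw.strip()
--         if not line:
--             continue
--         if line.lower().startswith("domain profile"):
--             current = "Domain"
--         elif line.lower().startswith("private profile"):
--             current = "Private"
--         elif line.lower().startswith("public profile"):
--             current = "Public"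
--         elif line.startswith("State") and current:
--             # Example: State                                 ON
--             parts = line.split()
--             if parts:
--                 states[current] = parts[-1].upper()
--     return states
-- ===== SOURCE B (Python) =====
-- # B: two-pass decomposition — first group stripped lines under their profile header,
-- # then compute each profile's state by scanning its lines back-to-front for the last "State" line.
--
-- def _last_state(lines):
--     for line in reversed(lines):
--         if line.startswith("State"):
--             return line.split()[-1].upper()
--     return "unknown"
--
--
-- def _parse_allprofiles(output):
--     groups = {"Domain": [], "Private": [], "Public": []}
--     current = None
--     for raw in (output or "").splitlines():
--         line = raw.strip()
--         low = line.lower()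
--         if low.startswith("domain profile"):
--             current = "Domain"
--         elif low.startswith("private profile"):
--             current = "Private"
--         elif low.startswith("public profile"):
--             current = "Public"
--         elif current is not None:
--             groups[current].append(line)
--     return {name: _last_state(lines) for name, lines in groups.items()}
-- ===== Notes on version B (the rewrite author's own statement) =====
-- stated objective: alternative
-- what changed: Replaced the single-pass state machine that updates the states dict in place with a two-pass decomposition: first group stripped lines under their active profile header, then derive each profile's state by a back-to-front scan of its group for the last 'State' line.
import Mathlib
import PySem

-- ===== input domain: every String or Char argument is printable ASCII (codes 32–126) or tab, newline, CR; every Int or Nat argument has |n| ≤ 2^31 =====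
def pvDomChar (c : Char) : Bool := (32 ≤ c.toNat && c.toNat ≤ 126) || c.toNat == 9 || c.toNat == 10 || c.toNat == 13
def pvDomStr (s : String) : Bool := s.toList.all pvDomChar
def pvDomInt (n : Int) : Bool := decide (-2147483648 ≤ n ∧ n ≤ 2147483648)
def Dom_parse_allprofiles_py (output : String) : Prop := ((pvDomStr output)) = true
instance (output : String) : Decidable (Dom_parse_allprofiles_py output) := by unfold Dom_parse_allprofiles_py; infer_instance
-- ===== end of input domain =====

-- B replaces A's single-pass in-place dict updates with a two-pass decomposition
-- (group lines under their profile header, then back-to-front scan each group); alternative, not faster.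


-- ===== PORT A =====
-- loop body of A: state is (current, states-dict)
def stepA (st : Option String × PySem.Dict String String) (raw : String) :
    Option String × PySem.Dict String String :=
  let line := PySem.Str.strip raw
  if line = "" then st                               -- if not line: continue
  else if PySem.Str.startswith (PySem.Str.lower line) "domain profile" then (some "Domain", st.2)
  else if PySem.Str.startswith (PySem.Str.lower line) "private profile" then (some "Private", st.2)
  else if PySem.Str.startswith (PySem.Str.lower line) "public profile" then (some "Public", st.2)
  else if PySem.Str.startswith line "State" then
    match st.1 with                                  -- "and current" (current is None or a nonempty string)
    | some cur =>
        let parts := PySem.Str.split₀ line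
        if parts.isEmpty then st                     -- if parts:
        else (st.1, st.2.insert cur (PySem.Str.upper ((PySem.List.pyGet? parts (-1)).getD "")))
          -- parts[-1]: parts ≠ [] in this branch, so pyGet? is always `some` (getD unreachable)
    | none => st
  else st

-- '(output or "")' equals output for strings (the only falsy string is "", and "".splitlines() = [])
def parse_allprofiles_py (output : String) : List (String × String) :=
  (((PySem.Str.splitlines output).foldl stepA
      (none, PySem.Dict.ofList [("Domain", "unknown"), ("Private", "unknown"), ("Public", "unknown")])).2).items

-- ===== PORT B =====
-- _last_state: walk the group back-to-front, first "State" line wins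
def lastStateB : List String → String
  | [] => "unknown"
  | line :: rest =>
      if PySem.Str.startswith line "State" then
        PySem.Str.upper ((PySem.List.pyGet? (PySem.Str.split₀ line) (-1)).getD "")
          -- line.split()[-1]: split₀ is nonempty here, so pyGet? is always `some`
      else lastStateB rest

-- loop body of B's first pass: state is (current, groups-dict)
def stepB (st : Option String × PySem.Dict String (List String)) (raw : String) :
    Option String × PySem.Dict String (List String) :=
  let line := PySem.Str.strip raw
  let low := PySem.Str.lower line
  if PySem.Str.startswith low "domain profile" then (some "Domain", st.2)
  else if PySem.Str.startswith low "private profile" then (some "Private", st.2)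
  else if PySem.Str.startswith low "public profile" then (some "Public", st.2)
  else
    match st.1 with
    | some cur => (st.1, st.2.modify cur [] (· ++ [line]))
        -- groups[current].append(line): cur is always one of the three keys, so the [] default is unreachable
    | none => st

def parse_allprofiles_py_alt (output : String) : List (String × String) :=
  let groups := ((PySem.Str.splitlines output).foldl stepB
      (none, PySem.Dict.ofList [("Domain", []), ("Private", []), ("Public", [])])).2
  (PySem.Dict.ofList (groups.items.map (fun kv => (kv.1, lastStateB kv.2.reverse)))).items

-- ===== PRECONDITION & SPEC =====
def Spec_parse_allprofiles_py (output : String) (out : List (String × String)) : Prop := out = parse_allprofiles_py_alt output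
instance (output : String) (out : List (String × String)) : Decidable (Spec_parse_allprofiles_py output out) := by unfold Spec_parse_allprofiles_py; infer_instance

-- ===== CLAIM (what is proved, stated in full; the proofs are below) =====
def Claim_equal_parse_allprofiles_py : Prop := ∀ (output : String), Dom_parse_allprofiles_py output → Spec_parse_allprofiles_py output (parse_allprofiles_py output)

-- ===== LEMMAS AND PROOFS =====

-- shorthands used only by the proofs
def mkd (a b p : String) : PySem.Dict String String :=
  PySem.Dict.mk [("Domain", a), ("Private", b), ("Public", p)]

def mkg (ga gb gp : List String) : PySem.Dict String (List String) :=
  PySem.Dict.mk [("Domain", ga), ("Private", gb), ("Public", gp)]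

theorem split₀go_ne_nil (s cur : List Char) (acc : List (List Char)) (h : cur ≠ [] ∨ acc ≠ []) :
    PySem.Chars.split₀.go s cur acc ≠ [] := by
  induction s generalizing cur acc with
  | nil =>
      simp only [PySem.Chars.split₀.go]
      rcases h with h | h
      · split_ifs with he
        · exact absurd (List.isEmpty_iff.mp he) h
        · simp
      · split_ifs <;> simp [h]
  | cons c rest ih =>
      simp only [PySem.Chars.split₀.go]
      split_ifs with hs he
      · refine ih [] acc (Or.inr ?_)
        rcases h with h | h
        · exact absurd (List.isEmpty_iff.mp he) h
        · exact h
      · exact ih [] _ (Or.inr (by simp))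
      · exact ih (c :: cur) acc (Or.inl (by simp))

-- a line that startswith "State" splits into at least one word
theorem split₀_state_ne_nil (line : String)
    (h : PySem.Str.startswith line "State" = true) :
    (PySem.Str.split₀ line).isEmpty = false := by
  rw [List.isEmpty_eq_false_iff]
  simp only [PySem.Str.split₀, ne_eq, List.map_eq_nil_iff]
  simp only [PySem.Str.startswith, PySem.Chars.startswith] at h
  rcases List.isPrefixOf_iff_prefix.mp h with ⟨t, ht⟩
  intro hnil
  have hline : line.toList = 'S' :: ('t' :: 'a' :: 't' :: 'e' :: t) := by rw [← ht]; rfl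
  have hS : PySem.Chars.isspace 'S' = false := by decide
  rw [PySem.Chars.split₀, hline] at hnil
  simp only [PySem.Chars.split₀.go, hS, Bool.false_eq_true, if_false] at hnil
  exact split₀go_ne_nil _ _ _ (Or.inl (by simp)) hnil

-- a line matching a nonempty header prefix is not the empty stripped line
theorem strip_ne_empty_of_header (raw : String) (p : List Char) (hp : p ≠ [])
    (h : PySem.Chars.startswith (PySem.Chars.lower (PySem.Chars.strip raw.toList)) p = true) :
    PySem.Str.strip raw ≠ "" := by
  intro h0
  have h1 : PySem.Chars.strip raw.toList = [] := by simpa using congrArg String.toList h0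
  rw [h1] at h
  simp only [PySem.Chars.startswith, PySem.Chars.lower, List.map_nil] at h
  exact hp (List.prefix_nil.mp (List.isPrefixOf_iff_prefix.mp h))

-- the joint invariant: A's fold on the states derivable from B's groups tracks B's fold
theorem main_inv (ls : List String) (c : Option String) (ga gb gp : List String)
    (hc : c = none ∨ c = some "Domain" ∨ c = some "Private" ∨ c = some "Public") :
    ∃ c' ga' gb' gp',
      ls.foldl stepB (c, mkg ga gb gp) = (c', mkg ga' gb' gp') ∧
      ls.foldl stepA (c, mkd (lastStateB ga.reverse) (lastStateB gb.reverse) (lastStateB gp.reverse))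
        = (c', mkd (lastStateB ga'.reverse) (lastStateB gb'.reverse) (lastStateB gp'.reverse)) := by
  induction ls generalizing c ga gb gp with
  | nil => exact ⟨c, ga, gb, gp, rfl, rfl⟩
  | cons raw rest ih =>
      simp only [List.foldl_cons]
      by_cases hD : PySem.Str.startswith (PySem.Str.lower (PySem.Str.strip raw)) "domain profile" = true
      all_goals simp at hD
      · have hne := strip_ne_empty_of_header raw _ (by simp) hD
        have hA : stepA (c, mkd (lastStateB ga.reverse) (lastStateB gb.reverse) (lastStateB gp.reverse)) raw
            = (some "Domain", mkd (lastStateB ga.reverse) (lastStateB gb.reverse) (lastStateB gp.reverse)) := by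
          simp [stepA, hne, hD]
        have hB : stepB (c, mkg ga gb gp) raw = (some "Domain", mkg ga gb gp) := by
          simp [stepB, hD]
        rw [hA, hB]; exact ih _ _ _ _ (by simp)
      by_cases hP : PySem.Str.startswith (PySem.Str.lower (PySem.Str.strip raw)) "private profile" = true
      all_goals simp at hP
      · have hne := strip_ne_empty_of_header raw _ (by simp) hP
        have hA : stepA (c, mkd (lastStateB ga.reverse) (lastStateB gb.reverse) (lastStateB gp.reverse)) raw
            = (some "Private", mkd (lastStateB ga.reverse) (lastStateB gb.reverse) (lastStateB gp.reverse)) := by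
          simp [stepA, hne, hD, hP]
        have hB : stepB (c, mkg ga gb gp) raw = (some "Private", mkg ga gb gp) := by
          simp [stepB, hD, hP]
        rw [hA, hB]; exact ih _ _ _ _ (by simp)
      by_cases hU : PySem.Str.startswith (PySem.Str.lower (PySem.Str.strip raw)) "public profile" = true
      all_goals simp at hU
      · have hne := strip_ne_empty_of_header raw _ (by simp) hU
        have hA : stepA (c, mkd (lastStateB ga.reverse) (lastStateB gb.reverse) (lastStateB gp.reverse)) raw
            = (some "Public", mkd (lastStateB ga.reverse) (lastStateB gb.reverse) (lastStateB gp.reverse)) := by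
          simp [stepA, hne, hD, hP, hU]
        have hB : stepB (c, mkg ga gb gp) raw = (some "Public", mkg ga gb gp) := by
          simp [stepB, hD, hP, hU]
        rw [hA, hB]; exact ih _ _ _ _ (by simp)
      -- not a header line
      rcases hc with hc | hc | hc | hc
      · -- current is None: both steps leave the state unchanged
        subst hc
        have hA : stepA (none, mkd (lastStateB ga.reverse) (lastStateB gb.reverse) (lastStateB gp.reverse)) raw
            = (none, mkd (lastStateB ga.reverse) (lastStateB gb.reverse) (lastStateB gp.reverse)) := by
          by_cases hl : PySem.Str.strip raw = ""
          · simp [stepA, hl]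
          · simp [stepA, hl, hD, hP, hU]
        have hB : stepB (none, mkg ga gb gp) raw = (none, mkg ga gb gp) := by
          simp [stepB, hD, hP, hU]
        rw [hA, hB]; exact ih _ _ _ _ (Or.inl rfl)
      all_goals subst hc
      -- current is one of the three profiles: B appends the line; A updates iff it is a State line
      · by_cases hS : PySem.Str.startswith (PySem.Str.strip raw) "State" = true
        · have hpe := split₀_state_ne_nil _ hS
          have hS2 : PySem.Chars.startswith (PySem.Chars.strip raw.toList) ['S','t','a','t','e'] = true := by
            simpa using hS
          have hnl : PySem.Str.strip raw ≠ "" := by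
            intro h0; rw [h0] at hS; revert hS; decide
          have hA : stepA (some "Domain", mkd (lastStateB ga.reverse) (lastStateB gb.reverse) (lastStateB gp.reverse)) raw
              = (some "Domain", mkd (lastStateB ((ga ++ [PySem.Str.strip raw]).reverse)) (lastStateB gb.reverse) (lastStateB gp.reverse)) := by
            simp [stepA, hnl, hD, hP, hU, hS2, hpe, lastStateB, PySem.Dict.insert, mkd]
          have hB : stepB (some "Domain", mkg ga gb gp) raw
              = (some "Domain", mkg (ga ++ [PySem.Str.strip raw]) gb gp) := by
            (simp [stepB, hD, hP, hU, PySem.Dict.modify, mkg]; rfl)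
          rw [hA, hB]; exact ih _ _ _ _ (by simp)
        · have hS2 : PySem.Chars.startswith (PySem.Chars.strip raw.toList) ['S','t','a','t','e'] = false := by
            simpa using hS
          have hA : stepA (some "Domain", mkd (lastStateB ga.reverse) (lastStateB gb.reverse) (lastStateB gp.reverse)) raw
              = (some "Domain", mkd (lastStateB ((ga ++ [PySem.Str.strip raw]).reverse)) (lastStateB gb.reverse) (lastStateB gp.reverse)) := by
            by_cases hl : PySem.Str.strip raw = ""
            · (simp [stepA, hl, lastStateB]; rfl)
            · simp [stepA, hl, hD, hP, hU, hS2, lastStateB]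
          have hB : stepB (some "Domain", mkg ga gb gp) raw
              = (some "Domain", mkg (ga ++ [PySem.Str.strip raw]) gb gp) := by
            (simp [stepB, hD, hP, hU, PySem.Dict.modify, mkg]; rfl)
          rw [hA, hB]; exact ih _ _ _ _ (by simp)
      · by_cases hS : PySem.Str.startswith (PySem.Str.strip raw) "State" = true
        · have hpe := split₀_state_ne_nil _ hS
          have hS2 : PySem.Chars.startswith (PySem.Chars.strip raw.toList) ['S','t','a','t','e'] = true := by
            simpa using hS
          have hnl : PySem.Str.strip raw ≠ "" := by
            intro h0; rw [h0] at hS; revert hS; decide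
          have hA : stepA (some "Private", mkd (lastStateB ga.reverse) (lastStateB gb.reverse) (lastStateB gp.reverse)) raw
              = (some "Private", mkd (lastStateB ga.reverse) (lastStateB ((gb ++ [PySem.Str.strip raw]).reverse)) (lastStateB gp.reverse)) := by
            simp [stepA, hnl, hD, hP, hU, hS2, hpe, lastStateB, PySem.Dict.insert, mkd]
          have hB : stepB (some "Private", mkg ga gb gp) raw
              = (some "Private", mkg ga (gb ++ [PySem.Str.strip raw]) gp) := by
            (simp [stepB, hD, hP, hU, PySem.Dict.modify, mkg]; rfl)
          rw [hA, hB]; exact ih _ _ _ _ (by simp)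
        · have hS2 : PySem.Chars.startswith (PySem.Chars.strip raw.toList) ['S','t','a','t','e'] = false := by
            simpa using hS
          have hA : stepA (some "Private", mkd (lastStateB ga.reverse) (lastStateB gb.reverse) (lastStateB gp.reverse)) raw
              = (some "Private", mkd (lastStateB ga.reverse) (lastStateB ((gb ++ [PySem.Str.strip raw]).reverse)) (lastStateB gp.reverse)) := by
            by_cases hl : PySem.Str.strip raw = ""
            · (simp [stepA, hl, lastStateB]; rfl)
            · simp [stepA, hl, hD, hP, hU, hS2, lastStateB]
          have hB : stepB (some "Private", mkg ga gb gp) raw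
              = (some "Private", mkg ga (gb ++ [PySem.Str.strip raw]) gp) := by
            (simp [stepB, hD, hP, hU, PySem.Dict.modify, mkg]; rfl)
          rw [hA, hB]; exact ih _ _ _ _ (by simp)
      · by_cases hS : PySem.Str.startswith (PySem.Str.strip raw) "State" = true
        · have hpe := split₀_state_ne_nil _ hS
          have hS2 : PySem.Chars.startswith (PySem.Chars.strip raw.toList) ['S','t','a','t','e'] = true := by
            simpa using hS
          have hnl : PySem.Str.strip raw ≠ "" := by
            intro h0; rw [h0] at hS; revert hS; decide
          have hA : stepA (some "Public", mkd (lastStateB ga.reverse) (lastStateB gb.reverse) (lastStateB gp.reverse)) raw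
              = (some "Public", mkd (lastStateB ga.reverse) (lastStateB gb.reverse) (lastStateB ((gp ++ [PySem.Str.strip raw]).reverse))) := by
            simp [stepA, hnl, hD, hP, hU, hS2, hpe, lastStateB, PySem.Dict.insert, mkd]
          have hB : stepB (some "Public", mkg ga gb gp) raw
              = (some "Public", mkg ga gb (gp ++ [PySem.Str.strip raw])) := by
            (simp [stepB, hD, hP, hU, PySem.Dict.modify, mkg]; rfl)
          rw [hA, hB]; exact ih _ _ _ _ (by simp)
        · have hS2 : PySem.Chars.startswith (PySem.Chars.strip raw.toList) ['S','t','a','t','e'] = false := by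
            simpa using hS
          have hA : stepA (some "Public", mkd (lastStateB ga.reverse) (lastStateB gb.reverse) (lastStateB gp.reverse)) raw
              = (some "Public", mkd (lastStateB ga.reverse) (lastStateB gb.reverse) (lastStateB ((gp ++ [PySem.Str.strip raw]).reverse))) := by
            by_cases hl : PySem.Str.strip raw = ""
            · (simp [stepA, hl, lastStateB]; rfl)
            · simp [stepA, hl, hD, hP, hU, hS2, lastStateB]
          have hB : stepB (some "Public", mkg ga gb gp) raw
              = (some "Public", mkg ga gb (gp ++ [PySem.Str.strip raw])) := by
            (simp [stepB, hD, hP, hU, PySem.Dict.modify, mkg]; rfl)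
          rw [hA, hB]; exact ih _ _ _ _ (by simp)

-- ===== VERDICT (by name: the statement is the Claim_ definition above) =====
theorem parse_allprofiles_py_spec : Claim_equal_parse_allprofiles_py := by
  intro output _hdom
  unfold Spec_parse_allprofiles_py
  obtain ⟨c', ga', gb', gp', hB, hA⟩ :=
    main_inv (PySem.Str.splitlines output) none [] [] [] (Or.inl rfl)
  unfold parse_allprofiles_py parse_allprofiles_py_alt
  have e1 : PySem.Dict.ofList [("Domain", "unknown"), ("Private", "unknown"), ("Public", "unknown")]
      = mkd (lastStateB ([] : List String).reverse) (lastStateB ([] : List String).reverse) (lastStateB ([] : List String).reverse) := by rfl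
  have e2 : PySem.Dict.ofList [("Domain", ([] : List String)), ("Private", []), ("Public", [])]
      = mkg [] [] [] := by rfl
  rw [e1, e2, hA, hB]
  rfl
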